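-- pv_equiv track=rewrite | github.com/Darwinky25/DARWIN-with-ALLA-engine | visual_semantic_translator.py | _in_corner
-- ===== SOURCE A (Python) =====
-- from typing import Dict, List, Tuple, Any, Optional
--
-- def _in_corner(positions: List[Tuple[int, int]],
--                grid_shape: Tuple[int, int]) -> bool:
--     """Check if object is in a corner"""
--     max_row, max_col = grid_shape[0] - 1, grid_shape[1] - 1
--     corners = [(0, 0), (0, max_col), (max_row, 0), (max_row, max_col)]
--
--     for corner in corners:
--         if corner in positions:
--             return True
--
--     return False
-- ===== SOURCE B (Python) =====
-- def _in_corner(positions, grid_shape):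
--     # Scan the positions once, testing each coordinate-wise against the
--     # corner characterization: a cell is a corner iff its row is 0 or
--     # grid_shape[0]-1 and its column is 0 or grid_shape[1]-1.
--     max_row, max_col = grid_shape[0] - 1, grid_shape[1] - 1
--     for r, c in positions:
--         if (r == 0 or r == max_row) and (c == 0 or c == max_col):
--             return True
--     return False
-- ===== Notes on version B (the rewrite author's own statement) =====
-- stated objective: alternative
-- what changed: Inverted the traversal: instead of looping over the four corner coordinates and testing each for membership in positions, B scans positions once and classifies each cell as a corner by the arithmetic predicate (row in {0, rows-1}) and (col in {0, cols-1}), building no corner collection at all.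
import Mathlib
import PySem

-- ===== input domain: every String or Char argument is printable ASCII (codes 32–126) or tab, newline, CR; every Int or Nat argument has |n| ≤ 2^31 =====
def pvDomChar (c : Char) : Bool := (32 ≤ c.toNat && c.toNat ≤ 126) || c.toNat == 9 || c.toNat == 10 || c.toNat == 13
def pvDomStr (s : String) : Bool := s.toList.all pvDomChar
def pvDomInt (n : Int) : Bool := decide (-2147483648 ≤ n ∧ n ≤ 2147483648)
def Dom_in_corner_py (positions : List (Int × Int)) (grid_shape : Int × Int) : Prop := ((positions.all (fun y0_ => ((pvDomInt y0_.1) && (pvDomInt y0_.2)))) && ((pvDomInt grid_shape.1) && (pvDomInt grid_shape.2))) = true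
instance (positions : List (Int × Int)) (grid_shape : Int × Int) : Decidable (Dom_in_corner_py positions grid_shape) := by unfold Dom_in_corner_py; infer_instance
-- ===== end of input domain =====

-- B inverts the traversal: a single scan over positions classifying each cell by the arithmetic corner predicate, instead of A's loop over the four corner coordinates with membership tests (objective: alternative).


-- ===== PORT A =====
-- literal port: max_row/max_col, corner list, early-return for-loop (List.any = first hit wins)
def in_corner_py (positions : List (Int × Int)) (grid_shape : Int × Int) : Bool :=
  let max_row := grid_shape.1 - 1
  let max_col := grid_shape.2 - 1
  let corners : List (Int × Int) := [(0, 0), (0, max_col), (max_row, 0), (max_row, max_col)]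
  corners.any (fun corner => positions.contains corner)

-- ===== PORT B =====
-- literal port of Source B: one early-return scan over positions, arithmetic corner predicate per cell
def in_corner_py_alt (positions : List (Int × Int)) (grid_shape : Int × Int) : Bool :=
  let max_row := grid_shape.1 - 1
  let max_col := grid_shape.2 - 1
  positions.any (fun p => (p.1 == 0 || p.1 == max_row) && (p.2 == 0 || p.2 == max_col))

-- ===== PRECONDITION & SPEC =====
def Spec_in_corner_py (positions : List (Int × Int)) (grid_shape : Int × Int) (out : Bool) : Prop := out = in_corner_py_alt positions grid_shape
instance (positions : List (Int × Int)) (grid_shape : Int × Int) (out : Bool) : Decidable (Spec_in_corner_py positions grid_shape out) := by unfold Spec_in_corner_py; infer_instance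

-- ===== CLAIM (what is proved, stated in full; the proofs are below) =====
def Claim_equal_in_corner_py : Prop := ∀ (positions : List (Int × Int)) (grid_shape : Int × Int), Dom_in_corner_py positions grid_shape → Spec_in_corner_py positions grid_shape (in_corner_py positions grid_shape)

-- ===== LEMMAS AND PROOFS =====

-- ===== VERDICT (by name: the statement is the Claim_ definition above) =====
theorem in_corner_py_spec : Claim_equal_in_corner_py := by
  intro positions grid_shape _
  unfold Spec_in_corner_py in_corner_py in_corner_py_alt
  rw [Bool.eq_iff_iff]
  simp only [List.any_eq_true, List.contains_eq_mem, List.mem_cons, List.not_mem_nil, or_false, decide_eq_true_eq, Bool.and_eq_true, Bool.or_eq_true,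
    beq_iff_eq]
  constructor
  · rintro ⟨c, hc, hmem⟩
    refine ⟨c, hmem, ?_⟩
    rcases hc with h | h | h | h <;> subst h <;> simp
  · rintro ⟨p, hp, ⟨hr | hr, hc | hc⟩⟩ <;> refine ⟨p, ?_, hp⟩ <;>
      simp [Prod.ext_iff, hr, hc]
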